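-- pv_equiv track=rewrite | github.com/AMarchmarti/Python | Codewars_kata/kyu_6/infected_zeroes.py | infected_zeroes
-- ===== SOURCE A (Python) =====
-- def infected_zeroes(lst):
--     turns = 0
--     lsttemporal = []
--     lsttemporal = lst[:]
--     if lst.count(0) == len(lst):
--         return turns
--     while lst.count(0) != len(lst):
--         for i in range(0,len(lst)):
--             if lst[i] == 0:
--                 if i > 0:
--                     lsttemporal[i - 1] = 0
--                 if i < len(lst) - 1:
--                     lsttemporal[i + 1] = 0
--         if i == len(lst) - 1:
--             turns += 1
--             lst = lsttemporal[:]
--     return turns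
-- ===== SOURCE B (Python) =====
-- def infected_zeroes(lst):
--     zeros = [i for i, v in enumerate(lst) if v == 0]
--     return max((min(abs(i - z) for z in zeros) for i in range(len(lst))), default=0)
-- ===== Notes on version B (the rewrite author's own statement) =====
-- stated objective: faster
-- what changed: B replaces A's repeated whole-list infection simulation (spread zeros one step per turn until all entries are zero) by a direct computation of the answer as the maximum over all indices of the distance to the nearest zero.
import Mathlib
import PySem

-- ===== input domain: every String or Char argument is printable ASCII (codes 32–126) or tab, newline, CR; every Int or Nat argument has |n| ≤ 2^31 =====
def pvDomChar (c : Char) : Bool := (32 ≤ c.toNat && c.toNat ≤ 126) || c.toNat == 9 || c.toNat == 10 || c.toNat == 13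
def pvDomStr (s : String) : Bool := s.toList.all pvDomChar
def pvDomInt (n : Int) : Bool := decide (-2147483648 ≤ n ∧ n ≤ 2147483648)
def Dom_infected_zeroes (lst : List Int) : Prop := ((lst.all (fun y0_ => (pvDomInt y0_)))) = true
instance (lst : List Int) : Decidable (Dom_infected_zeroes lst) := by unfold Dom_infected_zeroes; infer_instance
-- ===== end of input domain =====

-- B replaces A's O(n·turns) repeated-spreading simulation by a direct computation of the
-- maximal distance to the nearest zero (objective: alternative/faster on zero-sparse input).

-- ===== PORT A =====
-- the body of A's for-loop: reads lst, writes zeros into temp (lsttemporal == lst at loop entry)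
def spreadA (lst : List Int) : List Int :=
  (List.range lst.length).foldl (fun temp i =>
    if lst.getD i 1 = 0 then      -- lst[i] (i always in range; default never used)
      let t1 := if 0 < i then temp.set (i - 1) 0 else temp
      if i < lst.length - 1 then t1.set (i + 1) 0 else t1
    else temp) lst

-- A's while-loop, with fuel = lst.length (proved sufficient under Pre_; A diverges outside it).
-- A's trailing `if i == len(lst)-1` is always true inside the loop (i ends at len-1, len ≥ 1).
def loopA : Nat → List Int → Int → Int
  | 0, _, turns => turns
  | fuel+1, lst, turns =>
    if lst.count 0 = lst.length then turns
    else loopA fuel (spreadA lst) (turns + 1)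

def infected_zeroes (lst : List Int) : Int :=
  if lst.count 0 = lst.length then 0
  else loopA lst.length lst 0

-- ===== PORT B =====
-- min(abs(i - z) for z in zeros); Python's min raises on an empty generator — unreachable under Pre_
def nearestB (zs : List Nat) (i : Nat) : Nat :=
  match zs.map (fun (z : Nat) => ((i : Int) - (z : Int)).natAbs) with
  | [] => 0
  | d :: ds => ds.foldl min d

def infected_zeroes_alt (lst : List Int) : Int :=
  let zeros := (lst.zipIdx.filter (fun p => p.1 == 0)).map (·.2)
  (((List.range lst.length).map (fun i => nearestB zeros i)).foldl max 0 : Nat)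

-- ===== PRECONDITION & SPEC =====
-- Pre_ excludes nonempty lists containing no zero: there A's while-loop never terminates
-- (and B's min() raises ValueError).
def Pre_infected_zeroes (lst : List Int) : Prop := lst = [] ∨ (0 : Int) ∈ lst
instance (lst : List Int) : Decidable (Pre_infected_zeroes lst) := by unfold Pre_infected_zeroes; infer_instance

def pvWitness_infected_zeroes : List Int := [1, 0, 1]

def Spec_infected_zeroes (lst : List Int) (out : Int) : Prop := out = infected_zeroes_alt lst
instance (lst : List Int) (out : Int) : Decidable (Spec_infected_zeroes lst out) := by unfold Spec_infected_zeroes; infer_instance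

-- ===== CLAIM (what is proved, stated in full; the proofs are below) =====
def Claim_equal_infected_zeroes : Prop := ∀ (lst : List Int), Dom_infected_zeroes lst → Pre_infected_zeroes lst → Spec_infected_zeroes lst (infected_zeroes lst)

-- ===== LEMMAS AND PROOFS =====

-- proof-side abbreviations for B's pieces
def zerosOf (lst : List Int) : List Nat := (lst.zipIdx.filter (fun p => p.1 == 0)).map (·.2)
def dB (lst : List Int) (i : Nat) : Nat := nearestB (zerosOf lst) i
def maxdB (lst : List Int) : Nat := ((List.range lst.length).map (fun i => nearestB (zerosOf lst) i)).foldl max 0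

theorem alt_eq (lst : List Int) : infected_zeroes_alt lst = (maxdB lst : Int) := rfl

theorem getD_set (l : List Int) (i j : Nat) (a d : Int) :
    (l.set i a).getD j d = if i = j ∧ j < l.length then a else l.getD j d := by
  simp [List.getD_eq_getElem?_getD, List.getElem?_set]
  split_ifs <;> simp_all

theorem mem_zerosOf (lst : List Int) (z : Nat) :
    z ∈ zerosOf lst ↔ z < lst.length ∧ lst.getD z 1 = 0 := by
  unfold zerosOf
  simp only [List.mem_map, List.mem_filter, List.mem_zipIdx_iff_getElem?]
  constructor
  · rintro ⟨⟨a, i⟩, ⟨h1, h2⟩, h3⟩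
    simp at h1 h2 h3
    subst h3; subst h2
    have hlt := (List.getElem?_eq_some_iff.1 h1).1
    exact ⟨hlt, by simp [List.getD_eq_getElem?_getD, h1]⟩
  · rintro ⟨h1, h2⟩
    refine ⟨(0, z), ⟨?_, by simp⟩, rfl⟩
    rw [List.getElem?_eq_some_iff]
    exact ⟨h1, by rw [← List.getD_eq_getElem _ 1 h1]; exact h2⟩

theorem zerosOf_ne_nil (lst : List Int) (h : (0 : Int) ∈ lst) : zerosOf lst ≠ [] := by
  obtain ⟨k, hk, he⟩ := List.mem_iff_getElem.1 h
  have : k ∈ zerosOf lst := (mem_zerosOf lst k).2 ⟨hk, by rw [List.getD_eq_getElem _ 1 hk]; exact he⟩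
  exact List.ne_nil_of_mem this

theorem fmin_le_iff (l : List Nat) (a x : Nat) :
    l.foldl min a ≤ x ↔ a ≤ x ∨ ∃ b ∈ l, b ≤ x := by
  induction l generalizing a with
  | nil => simp
  | cons b t ih =>
    rw [List.foldl_cons, ih, min_le_iff]
    constructor
    · rintro ((h | h) | ⟨c, hc, hcx⟩)
      · exact Or.inl h
      · exact Or.inr ⟨b, List.mem_cons_self, h⟩
      · exact Or.inr ⟨c, List.mem_cons_of_mem _ hc, hcx⟩
    · rintro (h | ⟨c, hc, hcx⟩)
      · exact Or.inl (Or.inl h)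
      · rcases List.mem_cons.1 hc with rfl | hc'
        · exact Or.inl (Or.inr hcx)
        · exact Or.inr ⟨c, hc', hcx⟩

theorem fmax_le_iff (l : List Nat) (a x : Nat) :
    l.foldl max a ≤ x ↔ a ≤ x ∧ ∀ b ∈ l, b ≤ x := by
  induction l generalizing a with
  | nil => simp
  | cons b t ih =>
    rw [List.foldl_cons, ih, max_le_iff]
    constructor
    · rintro ⟨⟨h1, h2⟩, h3⟩
      refine ⟨h1, fun c hc => ?_⟩
      rcases List.mem_cons.1 hc with rfl | hc'
      · exact h2
      · exact h3 c hc'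
    · rintro ⟨h1, h2⟩
      exact ⟨⟨h1, h2 b List.mem_cons_self⟩, fun c hc => h2 c (List.mem_cons_of_mem _ hc)⟩

theorem nearestB_le_iff (z : Nat) (t : List Nat) (i x : Nat) :
    nearestB (z :: t) i ≤ x ↔ ∃ w ∈ z :: t, ((i : Int) - (w : Int)).natAbs ≤ x := by
  have hred : nearestB (z :: t) i
      = (t.map (fun (w : Nat) => ((i : Int) - (w : Int)).natAbs)).foldl min (((i : Int) - (z : Int)).natAbs) := by
    simp only [nearestB, List.map_cons]
  rw [hred, fmin_le_iff]
  constructor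
  · rintro (h1 | ⟨b, hb, hbx⟩)
    · exact ⟨z, List.mem_cons_self, h1⟩
    · obtain ⟨w, hw, rfl⟩ := List.mem_map.1 hb
      exact ⟨w, List.mem_cons_of_mem _ hw, hbx⟩
  · rintro ⟨w, hw, hwx⟩
    rcases List.mem_cons.1 hw with rfl | hw'
    · exact Or.inl hwx
    · exact Or.inr ⟨_, List.mem_map.2 ⟨w, hw', rfl⟩, hwx⟩

theorem dB_le_iff (lst : List Int) (i x : Nat) (h : (0 : Int) ∈ lst) :
    dB lst i ≤ x ↔ ∃ z, z < lst.length ∧ lst.getD z 1 = 0 ∧ ((i : Int) - (z : Int)).natAbs ≤ x := by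
  obtain ⟨z0, t0, he⟩ : ∃ z0 t0, zerosOf lst = z0 :: t0 := by
    cases hz : zerosOf lst with
    | nil => exact absurd hz (zerosOf_ne_nil lst h)
    | cons a b => exact ⟨a, b, rfl⟩
  rw [dB, he, nearestB_le_iff]
  rw [← he]
  constructor
  · rintro ⟨z, hz, hle⟩
    obtain ⟨h1, h2⟩ := (mem_zerosOf lst z).1 hz
    exact ⟨z, h1, h2, hle⟩
  · rintro ⟨z, h1, h2, hle⟩
    exact ⟨z, (mem_zerosOf lst z).2 ⟨h1, h2⟩, hle⟩

theorem dB_zero_iff (lst : List Int) (i : Nat) (h : (0 : Int) ∈ lst) (hi : i < lst.length) :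
    dB lst i ≤ 0 ↔ lst.getD i 1 = 0 := by
  rw [dB_le_iff lst i 0 h]
  constructor
  · rintro ⟨z, h1, h2, h3⟩
    have : z = i := by omega
    exact this ▸ h2
  · intro h1
    exact ⟨i, hi, h1, by omega⟩

theorem dB_succ_iff (lst : List Int) (i t : Nat) (h : (0 : Int) ∈ lst) (hi : i < lst.length) :
    dB lst i ≤ t + 1 ↔
      dB lst i ≤ t ∨ (0 < i ∧ dB lst (i - 1) ≤ t) ∨ (i + 1 < lst.length ∧ dB lst (i + 1) ≤ t) := by
  constructor
  · intro h1
    obtain ⟨z, hz, hz0, hle⟩ := (dB_le_iff lst i (t+1) h).1 h1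
    by_cases hcl : ((i : Int) - (z : Int)).natAbs ≤ t
    · exact Or.inl ((dB_le_iff lst i t h).2 ⟨z, hz, hz0, hcl⟩)
    · by_cases hlt : z < i
      · refine Or.inr (Or.inl ⟨by omega, (dB_le_iff lst (i-1) t h).2 ⟨z, hz, hz0, by omega⟩⟩)
      · refine Or.inr (Or.inr ⟨by omega, (dB_le_iff lst (i+1) t h).2 ⟨z, hz, hz0, by omega⟩⟩)
  · rintro (h1 | ⟨h1, h2⟩ | ⟨h1, h2⟩)
    · exact h1.trans (by omega)
    · obtain ⟨z, hz, hz0, hle⟩ := (dB_le_iff lst (i-1) t h).1 h2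
      exact (dB_le_iff lst i (t+1) h).2 ⟨z, hz, hz0, by omega⟩
    · obtain ⟨z, hz, hz0, hle⟩ := (dB_le_iff lst (i+1) t h).1 h2
      exact (dB_le_iff lst i (t+1) h).2 ⟨z, hz, hz0, by omega⟩

-- length preservation for spreadA's fold
theorem foldl_spread_length (lst : List Int) (l : List Nat) (acc : List Int) :
    (l.foldl (fun temp i =>
      if lst.getD i 1 = 0 then
        let t1 := if 0 < i then temp.set (i - 1) 0 else temp
        if i < lst.length - 1 then t1.set (i + 1) 0 else t1
      else temp) acc).length = acc.length := by
  induction l generalizing acc with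
  | nil => rfl
  | cons b t ih => simp only [List.foldl_cons]; rw [ih]; split_ifs <;> simp

theorem length_spreadA (lst : List Int) : (spreadA lst).length = lst.length := by
  unfold spreadA; exact foldl_spread_length lst _ lst

theorem spreadA_prefix (lst : List Int) (j : Nat) (hj : j < lst.length) :
    ∀ k, k ≤ lst.length →
    ((List.range k).foldl (fun temp i =>
      if lst.getD i 1 = 0 then
        let t1 := if 0 < i then temp.set (i - 1) 0 else temp
        if i < lst.length - 1 then t1.set (i + 1) 0 else t1
      else temp) lst).getD j 1 =
    if (j + 1 < k ∧ lst.getD (j+1) 1 = 0) ∨ (0 < j ∧ j - 1 < k ∧ lst.getD (j-1) 1 = 0)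
    then 0 else lst.getD j 1 := by
  intro k
  induction k with
  | zero => intro _; simp
  | succ k ih =>
    intro hk
    have hk' : k ≤ lst.length := by omega
    rw [List.range_succ, List.foldl_append, List.foldl_cons, List.foldl_nil]
    have hFlen := foldl_spread_length lst (List.range k) lst
    have hFg := ih hk'
    revert hFlen hFg
    generalize ((List.range k).foldl (fun temp i =>
      if lst.getD i 1 = 0 then
        let t1 := if 0 < i then temp.set (i - 1) 0 else temp
        if i < lst.length - 1 then t1.set (i + 1) 0 else t1
      else temp) lst) = F
    intro hFlen hFg
    have e1 : j + 1 = k → lst.getD (j+1) 1 = lst.getD k 1 := fun e => by rw [e]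
    have e2 : j - 1 = k → lst.getD (j-1) 1 = lst.getD k 1 := fun e => by rw [e]
    by_cases hk0 : lst.getD k 1 = 0
    · rw [if_pos hk0]
      show (if k < lst.length - 1 then (if 0 < k then F.set (k-1) 0 else F).set (k+1) 0
            else (if 0 < k then F.set (k-1) 0 else F)).getD j 1 = _
      by_cases h0k : 0 < k
      · rw [if_pos h0k]
        by_cases hk1 : k < lst.length - 1
        · rw [if_pos hk1, getD_set, getD_set, hFg]
          rw [List.length_set, hFlen]
          split_ifs <;> omega
        · rw [if_neg hk1, getD_set, hFg, hFlen]
          split_ifs <;> omega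
      · rw [if_neg h0k]
        by_cases hk1 : k < lst.length - 1
        · rw [if_pos hk1, getD_set, hFg, hFlen]
          split_ifs <;> omega
        · rw [if_neg hk1, hFg]
          split_ifs <;> omega
    · rw [if_neg hk0, hFg]
      split_ifs <;> omega

theorem spreadA_getD (lst : List Int) (j : Nat) (hj : j < lst.length) :
    (spreadA lst).getD j 1 =
    if (j + 1 < lst.length ∧ lst.getD (j+1) 1 = 0) ∨ (0 < j ∧ lst.getD (j-1) 1 = 0)
    then 0 else lst.getD j 1 := by
  unfold spreadA
  rw [spreadA_prefix lst j hj lst.length le_rfl]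
  have h : ((j + 1 < lst.length ∧ lst.getD (j+1) 1 = 0) ∨ (0 < j ∧ j - 1 < lst.length ∧ lst.getD (j-1) 1 = 0)) ↔
      ((j + 1 < lst.length ∧ lst.getD (j+1) 1 = 0) ∨ (0 < j ∧ lst.getD (j-1) 1 = 0)) := by
    constructor
    · rintro (h1 | ⟨a, b, c⟩)
      exacts [Or.inl h1, Or.inr ⟨a, c⟩]
    · rintro (h1 | ⟨a, c⟩)
      exacts [Or.inl h1, Or.inr ⟨a, by omega, c⟩]
  rw [if_congr h rfl rfl]

-- the closed-form state of A's simulation after t turns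
def MS (lst : List Int) (t : Nat) : List Int :=
  (List.range lst.length).map (fun j => if dB lst j ≤ t then 0 else lst.getD j 1)

theorem length_MS (lst : List Int) (t : Nat) : (MS lst t).length = lst.length := by
  simp [MS]

theorem MS_getD (lst : List Int) (t j : Nat) (hj : j < lst.length) :
    (MS lst t).getD j 1 = if dB lst j ≤ t then 0 else lst.getD j 1 := by
  rw [List.getD_eq_getElem _ 1 (by simpa [length_MS] using hj)]
  simp [MS]

theorem MS_zero_iff (lst : List Int) (t j : Nat) (h : (0 : Int) ∈ lst) (hj : j < lst.length) :
    (MS lst t).getD j 1 = 0 ↔ dB lst j ≤ t := by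
  rw [MS_getD lst t j hj]
  split_ifs with hd
  · simp [hd]
  · simp only [iff_false_intro hd, iff_false]
    intro h0
    exact hd (le_trans ((dB_zero_iff lst j h hj).2 h0) (by omega))

theorem MS_zero (lst : List Int) (h : (0 : Int) ∈ lst) : MS lst 0 = lst := by
  apply List.ext_getElem (by simp [length_MS])
  intro j hj1 hj2
  have hj : j < lst.length := hj2
  rw [← List.getD_eq_getElem (MS lst 0) 1 hj1, ← List.getD_eq_getElem lst 1 hj]
  rw [MS_getD lst 0 j hj]
  split_ifs with hd
  · exact ((dB_zero_iff lst j h hj).1 hd).symm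
  · rfl

theorem MS_step (lst : List Int) (t : Nat) (h : (0 : Int) ∈ lst) :
    spreadA (MS lst t) = MS lst (t + 1) := by
  apply List.ext_getElem (by simp [length_spreadA, length_MS])
  intro j hj1 hj2
  have hj : j < lst.length := by simpa [length_MS] using hj2
  have hjM : j < (MS lst t).length := by simpa [length_MS] using hj
  rw [← List.getD_eq_getElem _ 1 hj1, ← List.getD_eq_getElem _ 1 hj2]
  rw [spreadA_getD (MS lst t) j hjM]
  rw [MS_getD lst (t+1) j hj]
  have hMlen : (MS lst t).length = lst.length := length_MS lst t
  by_cases hhit : (j + 1 < (MS lst t).length ∧ (MS lst t).getD (j+1) 1 = 0) ∨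
      (0 < j ∧ (MS lst t).getD (j-1) 1 = 0)
  · rw [if_pos hhit]
    have : dB lst j ≤ t + 1 := by
      rcases hhit with ⟨h1, h2⟩ | ⟨h1, h2⟩
      · have h1' : j + 1 < lst.length := by omega
        exact (dB_succ_iff lst j t h hj).2 (Or.inr (Or.inr ⟨h1', (MS_zero_iff lst t (j+1) h h1').1 h2⟩))
      · have h1' : j - 1 < lst.length := by omega
        exact (dB_succ_iff lst j t h hj).2 (Or.inr (Or.inl ⟨h1, (MS_zero_iff lst t (j-1) h h1').1 h2⟩))
    rw [if_pos this]
  · rw [if_neg hhit]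
    rw [MS_getD lst t j hj]
    by_cases hd : dB lst j ≤ t
    · rw [if_pos hd, if_pos (by omega)]
    · rw [if_neg hd, if_neg ?_]
      intro hd1
      rcases (dB_succ_iff lst j t h hj).1 hd1 with h1 | ⟨h1, h2⟩ | ⟨h1, h2⟩
      · exact hd h1
      · exact hhit (Or.inr ⟨h1, (MS_zero_iff lst t (j-1) h (by omega)).2 h2⟩)
      · exact hhit (Or.inl ⟨by omega, (MS_zero_iff lst t (j+1) h (by omega)).2 h2⟩)

theorem count_all_iff (M : List Int) :
    M.count 0 = M.length ↔ ∀ j, (hj : j < M.length) → M.getD j 1 = 0 := by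
  rw [List.count_eq_length]
  constructor
  · intro hall j hj
    rw [List.getD_eq_getElem _ 1 hj]
    exact (hall _ (List.getElem_mem hj)).symm
  · intro hall b hb
    obtain ⟨j, hj, rfl⟩ := List.mem_iff_getElem.1 hb
    rw [← List.getD_eq_getElem _ 1 hj]
    exact (hall j hj).symm

theorem maxdB_le_iff (lst : List Int) (x : Nat) :
    maxdB lst ≤ x ↔ ∀ j, j < lst.length → dB lst j ≤ x := by
  unfold maxdB
  rw [fmax_le_iff]
  simp only [Nat.zero_le, true_and, List.mem_map, List.mem_range]
  constructor
  · intro hall j hj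
    exact hall _ ⟨j, hj, rfl⟩
  · rintro hall b ⟨j, hj, rfl⟩
    exact hall j hj

theorem maxdB_bound (lst : List Int) (h : (0 : Int) ∈ lst) : maxdB lst ≤ lst.length := by
  rw [maxdB_le_iff]
  intro j hj
  obtain ⟨k, hk, he⟩ := List.mem_iff_getElem.1 h
  exact (dB_le_iff lst j lst.length h).2
    ⟨k, hk, by rw [List.getD_eq_getElem _ 1 hk]; exact he, by omega⟩

theorem loopA_MS (lst : List Int) (h : (0 : Int) ∈ lst) :
    ∀ (fuel t : Nat) (c : Int), maxdB lst ≤ t + fuel →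
      loopA fuel (MS lst t) c = c + ((maxdB lst - t : Nat) : Int) := by
  intro fuel
  induction fuel with
  | zero =>
    intro t c hb
    have : maxdB lst - t = 0 := by omega
    simp [loopA, this]
  | succ f ih =>
    intro t c hb
    rw [loopA]
    by_cases hle : maxdB lst ≤ t
    · rw [if_pos ?_]
      · have : maxdB lst - t = 0 := by omega
        simp [this]
      · rw [count_all_iff]
        intro j hj
        have hj' : j < lst.length := by simpa [length_MS] using hj
        exact (MS_zero_iff lst t j h hj').2 ((maxdB_le_iff lst t).1 hle j hj')
    · rw [if_neg ?_]
      · rw [MS_step lst t h, ih (t+1) (c+1) (by omega)]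
        have h1 : maxdB lst - t = (maxdB lst - (t+1)) + 1 := by omega
        rw [h1]
        push_cast
        ring
      · rw [count_all_iff]
        intro hall
        apply hle
        rw [maxdB_le_iff]
        intro j hj
        exact (MS_zero_iff lst t j h hj).1 (hall j (by simpa [length_MS] using hj))

-- ===== VERDICT (by name: the statement is the Claim_ definition above) =====
theorem infected_zeroes_spec : Claim_equal_infected_zeroes := by
  intro lst _ hpre
  unfold Spec_infected_zeroes
  rcases hpre with rfl | h
  · rfl
  · rw [alt_eq]
    unfold infected_zeroes
    by_cases hcnt : lst.count 0 = lst.length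
    · rw [if_pos hcnt]
      have : maxdB lst ≤ 0 := by
        rw [maxdB_le_iff]
        intro j hj
        exact (dB_zero_iff lst j h hj).2 ((count_all_iff lst).1 hcnt j hj)
      have h0 : maxdB lst = 0 := by omega
      simp [h0]
    · rw [if_neg hcnt]
      have hstart : lst = MS lst 0 := (MS_zero lst h).symm
      calc loopA lst.length lst 0
          = loopA lst.length (MS lst 0) 0 := by rw [← hstart]
        _ = 0 + ((maxdB lst - 0 : Nat) : Int) := loopA_MS lst h lst.length 0 0 (by simpa using maxdB_bound lst h)
        _ = (maxdB lst : Int) := by simp
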